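-- pv_equiv track=rewrite | github.com/chaofanwang123/My-Hackerrank-Solutions-Python- | Greedy Florist.py | getMinimumCost
-- ===== SOURCE A (Python) =====
-- def getMinimumCost(k, c):
--     n=len(c)
--     if k>=n:
--         return sum(c)
--     c.sort(reverse=True)
--     cost=0
--     quo=0
--     rem=n
--     while rem>=k:
--         cost+=(quo+1)*sum(c[quo*k:(quo+1)*k])
--         quo+=1
--         rem-=k
--     if rem>0:
--         cost+=(quo+1)*sum(c[quo*k:])
--     return cost
-- ===== SOURCE B (Python) =====
-- def getMinimumCost(k, c):
--     if k >= len(c):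
--         return sum(c)
--     c.sort(reverse=True)
--     return sum((i // k + 1) * x for i, x in enumerate(c))
-- ===== Notes on version B (the rewrite author's own statement) =====
-- stated objective: simpler
-- what changed: Replaced the while-loop over k-sized slices with quotient/remainder counters and a separate tail branch by a single enumerate pass that gives each sorted element its multiplier i//k+1 directly.
import Mathlib
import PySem

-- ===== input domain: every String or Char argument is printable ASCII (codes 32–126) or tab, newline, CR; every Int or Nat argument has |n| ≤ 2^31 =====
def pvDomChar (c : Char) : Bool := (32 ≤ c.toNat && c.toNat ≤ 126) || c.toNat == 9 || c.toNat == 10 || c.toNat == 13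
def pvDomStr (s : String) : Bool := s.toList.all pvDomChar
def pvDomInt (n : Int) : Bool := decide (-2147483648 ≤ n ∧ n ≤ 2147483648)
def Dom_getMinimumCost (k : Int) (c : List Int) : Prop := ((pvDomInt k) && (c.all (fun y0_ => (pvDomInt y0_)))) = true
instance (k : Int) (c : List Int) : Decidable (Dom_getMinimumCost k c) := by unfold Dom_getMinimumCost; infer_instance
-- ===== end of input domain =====

-- B replaces A's slice-chunked while loop (quotient/remainder counters + tail branch) by one
-- enumerate pass giving element i the multiplier i//k+1; equal return values on Pre_.
-- Both A and B sort c in place when k < len(c) (same observable mutation); the equivalence proved is about the return value.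

-- ===== PORT A =====
-- the while loop: state (cost, quo, rem); fuel only makes it total (on Pre_ it never runs out)
def pvLoopA (k : Int) (d : List Int) : Nat → Int → Int → Int → Int
  | 0, cost, _, _ => cost
  | fuel+1, cost, quo, rem =>
    if rem ≥ k then
      pvLoopA k d fuel
        (cost + (quo + 1) * (PySem.List.slice d (some (quo * k)) (some ((quo + 1) * k))).sum)
        (quo + 1) (rem - k)
    else if rem > 0 then
      cost + (quo + 1) * (PySem.List.slice d (some (quo * k)) none).sum
    else cost

def getMinimumCost (k : Int) (c : List Int) : Int :=
  let n : Int := c.length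
  if k ≥ n then c.sum
  else
    let d := PySem.List.sorted c (fun x => x) true
    pvLoopA k d (c.length + 1) 0 0 n

-- ===== PORT B =====
def getMinimumCost_alt (k : Int) (c : List Int) : Int :=
  if k ≥ (c.length : Int) then c.sum
  else
    let d := PySem.List.sorted c (fun x => x) true
    ((PySem.List.enumerate d).map (fun p => (PySem.Int.floordiv p.1 k + 1) * p.2)).sum

-- ===== PRECONDITION & SPEC =====
-- Pre_ excludes k ≤ 0 with k < len(c): there A's while loop never terminates (rem never drops below k), so A does not return.
def Pre_getMinimumCost (k : Int) (c : List Int) : Prop := 0 < k ∨ (c.length : Int) ≤ k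
instance (k : Int) (c : List Int) : Decidable (Pre_getMinimumCost k c) := by
  unfold Pre_getMinimumCost; infer_instance

def pvWitness_getMinimumCost : Int × List Int := (2, [1, 3, 5, 7])

def Spec_getMinimumCost (k : Int) (c : List Int) (out : Int) : Prop := out = getMinimumCost_alt k c
instance (k : Int) (c : List Int) (out : Int) : Decidable (Spec_getMinimumCost k c out) := by
  unfold Spec_getMinimumCost; infer_instance

-- ===== CLAIM (what is proved, stated in full; the proofs are below) =====
def Claim_equal_getMinimumCost : Prop := ∀ (k : Int) (c : List Int), Dom_getMinimumCost k c → Pre_getMinimumCost k c → Spec_getMinimumCost k c (getMinimumCost k c)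

-- ===== LEMMAS AND PROOFS =====

-- B's weighted sum over the suffix of the sorted list starting at index s
def pvGsum (k s : Int) (l : List Int) : Int :=
  ((PySem.List.enumerate l s).map (fun p => (PySem.Int.floordiv p.1 k + 1) * p.2)).sum

theorem pvGsum_nil (k s : Int) : pvGsum k s [] = 0 := by
  simp [pvGsum, PySem.List.enumerate]

theorem pvGsum_append (k s : Int) (xs ys : List Int) :
    pvGsum k s (xs ++ ys) = pvGsum k s xs + pvGsum k (s + xs.length) ys := by
  induction xs generalizing s with
  | nil => simp [pvGsum]
  | cons x t ih =>
    simp only [List.cons_append, pvGsum, PySem.List.enumerate_cons, List.map_cons, List.sum_cons]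
    have hih := ih (s + 1)
    simp only [pvGsum] at hih
    have harg : s + ((x :: t).length : Int) = s + 1 + (t.length : Int) := by push_cast [List.length_cons]; ring
    rw [harg, hih]
    ring

-- all indices of one chunk share the quotient q, so the chunk contributes (q+1) * its sum
theorem pvGsum_const (k : Int) (hk : 0 < k) (l : List Int) :
    ∀ (s q : Int), q * k ≤ s → s + l.length ≤ (q + 1) * k → pvGsum k s l = (q + 1) * l.sum := by
  induction l with
  | nil => intro s q _ _; simp [pvGsum_nil]
  | cons x t ih =>
    intro s q h1 h2
    simp only [List.length_cons] at h2
    have hq : PySem.Int.floordiv s k = q := by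
      rw [PySem.Int.floordiv_eq_iff_of_pos hk]
      constructor
      · exact h1
      · have ht : (0:Int) ≤ (t.length : Int) := by positivity
        push_cast at h2
        linarith
    simp only [pvGsum, PySem.List.enumerate_cons, List.map_cons, List.sum_cons, hq]
    have hih := ih (s + 1) q (by omega) (by push_cast at h2; linarith)
    simp only [pvGsum] at hih
    rw [hih]
    ring

-- the loop invariant: with quo = q and rem = len(d) - q*k, the loop adds exactly
-- B's weighted sum over the suffix d[q*k:]
theorem pvLoopA_inv (k : Int) (hk : 0 < k) (d : List Int) :
    ∀ (fuel : Nat) (q : Nat) (cost : Int),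
      (d.length : Int) - q * k ≤ fuel * k →
      pvLoopA k d fuel cost (q : Int) ((d.length : Int) - q * k)
        = cost + pvGsum k ((q : Int) * k) (d.drop (q * k.toNat)) := by
  intro fuel
  induction fuel with
  | zero =>
    intro q cost hle
    have hkk : (k.toNat : Int) = k := Int.toNat_of_nonneg (le_of_lt hk)
    have hm : ((q * k.toNat : Nat) : Int) = (q : Int) * k := by push_cast [hkk]; ring
    simp only [Nat.cast_zero, zero_mul] at hle
    rw [← hm] at hle
    have hdrop : d.drop (q * k.toNat) = [] := by
      apply List.drop_eq_nil_of_le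
      omega
    simp [pvLoopA, hdrop, pvGsum_nil]
  | succ fuel ih =>
    intro q cost hle
    have hkk : (k.toNat : Int) = k := Int.toNat_of_nonneg (le_of_lt hk)
    have hm : ((q * k.toNat : Nat) : Int) = (q : Int) * k := by push_cast [hkk]; ring
    have hm1 : (((q + 1) * k.toNat : Nat) : Int) = ((q : Int) + 1) * k := by push_cast [hkk]; ring
    have e1 : ((q : Int) * k).toNat = q * k.toNat := by rw [← hm]; exact Int.toNat_natCast _
    have e2 : (((q : Int) + 1) * k).toNat = (q + 1) * k.toNat := by rw [← hm1]; exact Int.toNat_natCast _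
    by_cases hrem : (d.length : Int) - q * k ≥ k
    · -- loop body runs
      rw [pvLoopA, if_pos hrem]
      have hlenN : k.toNat ≤ (d.drop (q * k.toNat)).length := by
        rw [List.length_drop]
        have hrem' := hrem
        rw [← hm, ← hkk] at hrem'
        omega
      have hslice : PySem.List.slice d (some ((q : Int) * k)) (some (((q : Int) + 1) * k))
          = (d.drop (q * k.toNat)).take k.toNat := by
        rw [PySem.List.slice_toNat d (by positivity) (by positivity), e1, e2]
        congr 1
        rw [Nat.succ_mul]
        omega
      have hstep : (d.length : Int) - ((q + 1 : Nat) : Int) * k ≤ (fuel : Nat) * k := by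
        push_cast at hle ⊢
        nlinarith
      have hih := ih (q + 1)
        (cost + ((q : Int) + 1) * (PySem.List.slice d (some ((q : Int) * k)) (some (((q : Int) + 1) * k))).sum)
        hstep
      push_cast at hih
      have harg : (d.length : Int) - (q : Int) * k - k = (d.length : Int) - ((q : Int) + 1) * k := by ring
      rw [harg, hih]
      have hsplit := pvGsum_append k ((q : Int) * k)
        ((d.drop (q * k.toNat)).take k.toNat) ((d.drop (q * k.toNat)).drop k.toNat)
      rw [List.take_append_drop] at hsplit
      have htlenN : ((d.drop (q * k.toNat)).take k.toNat).length = k.toNat := by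
        rw [List.length_take]
        omega
      have hdd : (d.drop (q * k.toNat)).drop k.toNat = d.drop ((q + 1) * k.toNat) := by
        rw [List.drop_drop]
        congr 1
        ring
      rw [hsplit, htlenN, hdd, hkk]
      have hchunk : pvGsum k ((q : Int) * k) ((d.drop (q * k.toNat)).take k.toNat)
          = ((q : Int) + 1) * ((d.drop (q * k.toNat)).take k.toNat).sum := by
        apply pvGsum_const k hk _ _ _ le_rfl
        rw [htlenN, hkk]
        nlinarith [hk]
      rw [hchunk, hslice]
      have hq1 : ((q : Int) * k + k) = ((q : Int) + 1) * k := by ring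
      rw [hq1]
      ring
    · -- loop exits: the remaining tail (length < k) all gets multiplier q+1
      rw [pvLoopA, if_neg hrem]
      by_cases hpos : (d.length : Int) - (q : Int) * k > 0
      · rw [if_pos hpos]
        have hslice : PySem.List.slice d (some ((q : Int) * k)) none = d.drop (q * k.toNat) := by
          rw [PySem.List.slice_from d (by positivity), e1]
        rw [hslice]
        have hlen2 : ((d.drop (q * k.toNat)).length : Int) ≤ k := by
          rw [List.length_drop]
          have hrem' := hrem
          rw [← hm, ← hkk] at hrem'
          rw [← hkk]
          omega
        have := pvGsum_const k hk (d.drop (q * k.toNat)) ((q : Int) * k) (q : Int) le_rfl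
          (by nlinarith)
        rw [this]
      · rw [if_neg hpos]
        have hle' : (d.length : Int) - ((q * k.toNat : Nat) : Int) ≤ 0 := by rw [hm]; omega
        have hdrop : d.drop (q * k.toNat) = [] := by
          apply List.drop_eq_nil_of_le
          omega
        simp [hdrop, pvGsum_nil]

-- ===== VERDICT (by name: the statement is the Claim_ definition above) =====
theorem getMinimumCost_spec : Claim_equal_getMinimumCost := by
  intro k c _ hpre
  unfold Spec_getMinimumCost
  simp only [getMinimumCost, getMinimumCost_alt]
  by_cases hk : k ≥ (c.length : Int)
  · rw [if_pos hk, if_pos hk]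
  · rw [if_neg hk, if_neg hk]
    have hkpos : 0 < k := by
      rcases hpre with h | h
      · exact h
      · exact absurd h (by omega)
    set d := PySem.List.sorted c (fun x => x) true with hd
    have hdlen : d.length = c.length := PySem.List.length_sorted c (fun x => x) true
    have hfuel : (d.length : Int) - ((0 : Nat) : Int) * k ≤ ((c.length + 1 : Nat) : Int) * k := by
      push_cast [hdlen]
      have h1 : ((c.length : Int) + 1) * 1 ≤ ((c.length : Int) + 1) * k := by
        apply mul_le_mul_of_nonneg_left hkpos (by positivity)
      nlinarith
    have hinv := pvLoopA_inv k hkpos d (c.length + 1) 0 0 hfuel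
    simp only [Nat.cast_zero, zero_mul, sub_zero, List.drop_zero, zero_add] at hinv
    rw [hdlen] at hinv
    rw [hinv]
    simp [pvGsum]
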